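-- pv_equiv track=rewrite | github.com/byzer-org/byzer-lang | dev/python/convert_pom.py | find
-- ===== SOURCE A (Python) =====
-- from typing import Any, NoReturn, Callable, Dict, List
--
-- def cleanLine(line: str) -> str:
--     return line.rstrip("\n").strip()
--
-- def find(lines: List[str], start: int, start_tag: str, end_tag: str, stop_tag: str) -> (int, int):
--     _start = start
--     start_tag_index = -1
--     end_tag_index = -1
--     while _start < len(lines):
--         if cleanLine(lines[_start]) == "":
--             _start += 1
--             continue
--         if cleanLine(lines[_start]) == stop_tag:
--             break
--         if cleanLine(lines[_start]) == start_tag and end_tag_index == -1: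
--             start_tag_index = _start
--
--         if cleanLine(lines[_start]) == end_tag and start_tag != -1:
--             end_tag_index = _start
--         _start += 1
--     return start_tag_index, end_tag_index
-- ===== SOURCE B (Python) =====
-- def find(lines, start, start_tag, end_tag, stop_tag):
--     pairs = [(i, lines[i].rstrip("\n").strip()) for i in range(start, len(lines))]
--     region = []
--     for p in pairs:
--         if p[1] != "" and p[1] == stop_tag:
--             break
--         region.append(p)
--     ends = [i for i, c in region if c != "" and c == end_tag]
--     first_end = ends[0] if ends else None
--     starts = [i for i, c in region
--               if c != "" and c == start_tag and (first_end is None or i <= first_end)]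
--     return (starts[-1] if starts else -1), (ends[-1] if ends else -1)
-- ===== Notes on version B (the rewrite author's own statement) =====
-- stated objective: simpler
-- what changed: A's single stateful while-loop with continue/break, last-match overwriting and a -1 sentinel is replaced by: build (index, cleaned line) pairs, cut the region at the first stop-tag line, then read both answers off that region with comprehensions (last end tag; last start tag at or before the first end tag).
-- outside the precondition, e.g. on find(['S', 'E'], -2, 'S', 'E', 'X'): A returns (0, 1), B returns (-2, 1); on find([], -1, 'S', 'E', 'X'): A raises IndexError, B raises IndexError
import Mathlib
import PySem

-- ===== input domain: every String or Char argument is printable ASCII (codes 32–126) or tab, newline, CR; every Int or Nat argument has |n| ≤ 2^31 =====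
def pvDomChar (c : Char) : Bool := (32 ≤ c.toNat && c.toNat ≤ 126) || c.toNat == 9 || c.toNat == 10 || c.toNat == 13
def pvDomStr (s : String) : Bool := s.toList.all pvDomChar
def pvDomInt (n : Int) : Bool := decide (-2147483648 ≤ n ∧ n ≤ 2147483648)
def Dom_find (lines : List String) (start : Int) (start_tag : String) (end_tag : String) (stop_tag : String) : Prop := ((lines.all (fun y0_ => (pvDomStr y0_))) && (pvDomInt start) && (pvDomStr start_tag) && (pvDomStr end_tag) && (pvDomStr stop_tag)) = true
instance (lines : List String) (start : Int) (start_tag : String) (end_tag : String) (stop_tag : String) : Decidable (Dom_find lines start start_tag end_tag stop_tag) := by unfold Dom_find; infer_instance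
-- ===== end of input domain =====

-- B replaces A's single stateful scan (mutable indices, continue/break, last-match overwriting)
-- by: build the (index, cleaned line) pairs, cut the region at the stop tag, then read both
-- answers off that region with comprehensions; objective: simpler. Equal on Pre_ (0 ≤ start).

-- ===== PORT A =====
-- line.rstrip("\n"): hand-ported (PySem has no rstrip-with-chars); exact: drops trailing '\n' chars
def rstripNl (line : String) : String :=
  String.ofList ((line.toList.reverse.dropWhile (fun c => c == '\n')).reverse)

-- cleanLine(line) = line.rstrip("\n").strip()
def cleanLine (line : String) : String := PySem.Str.strip (rstripNl line)

-- the while-loop of A; lines[_start] is pyGet? (none = IndexError, excluded by Pre_, defaulted "")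
def findLoop (lines : List String) (start_tag end_tag stop_tag : String) (i s e : Int) : Int × Int :=
  if _h : i < (lines.length : Int) then
    let c := cleanLine ((PySem.List.pyGet? lines i).getD "")
    if c = "" then findLoop lines start_tag end_tag stop_tag (i+1) s e
    else if c = stop_tag then (s, e)
    else
      findLoop lines start_tag end_tag stop_tag (i+1)
        (if c = start_tag ∧ e = -1 then i else s)
        -- A's guard 'start_tag != -1' compares a str with an int: always True in Python
        (if c = end_tag then i else e)
  else (s, e)
termination_by ((lines.length : Int) - i).toNat
decreasing_by all_goals omega

def find (lines : List String) (start : Int) (start_tag : String) (end_tag : String) (stop_tag : String) : Int × Int :=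
  findLoop lines start_tag end_tag stop_tag start (-1) (-1)

-- ===== PORT B =====
-- c != "" and c == t
def isTag (t : String) (p : Int × String) : Bool := p.2 != "" && p.2 == t

-- c != "" and c == start_tag and (first_end is None or i <= first_end)
def startCond (t : String) (fe : Option Int) (p : Int × String) : Bool :=
  isTag t p && (match fe with | none => true | some f => decide (p.1 ≤ f))

-- the region-building loop of Source B (append until the stop line, then break)
def regionOf (stop_tag : String) : List (Int × String) → List (Int × String)
  | [] => []
  | p :: rest => if p.2 != "" && p.2 == stop_tag then [] else p :: regionOf stop_tag rest

def find_alt (lines : List String) (start : Int) (start_tag : String) (end_tag : String) (stop_tag : String) : Int × Int :=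
  let pairs := (PySem.List.pyRange start (lines.length : Int) 1).map
      (fun i => (i, cleanLine ((PySem.List.pyGet? lines i).getD "")))
  let region := regionOf stop_tag pairs
  let ends := (region.filter (isTag end_tag)).map Prod.fst
  let starts := (region.filter (startCond start_tag ends.head?)).map Prod.fst
  (starts.getLast?.getD (-1), ends.getLast?.getD (-1))

-- ===== PRECONDITION & SPEC =====
-- Pre_ excludes negative start, outside the function's natural domain of line indices: there A
-- either raises IndexError (start < -len(lines)) or returns accidental values from Python's
-- negative-index wraparound colliding with A's -1 sentinel for "no end tag seen yet".
def Pre_find (lines : List String) (start : Int) (start_tag : String) (end_tag : String) (stop_tag : String) : Prop :=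
  0 ≤ start

instance (lines : List String) (start : Int) (start_tag : String) (end_tag : String) (stop_tag : String) : Decidable (Pre_find lines start start_tag end_tag stop_tag) := by unfold Pre_find; infer_instance

def pvWitness_find : List String × Int × String × String × String :=
  (["<dependencies>", "", "  <dep/>", "</dependencies>", "<build>"], 0, "<dependencies>", "</dependencies>", "<build>")

def Spec_find (lines : List String) (start : Int) (start_tag : String) (end_tag : String) (stop_tag : String) (out : Int × Int) : Prop := out = find_alt lines start start_tag end_tag stop_tag
instance (lines : List String) (start : Int) (start_tag : String) (end_tag : String) (stop_tag : String) (out : Int × Int) : Decidable (Spec_find lines start start_tag end_tag stop_tag out) := by unfold Spec_find; infer_instance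

-- ===== CLAIM (what is proved, stated in full; the proofs are below) =====
def Claim_equal_find : Prop := ∀ (lines : List String) (start : Int) (start_tag : String) (end_tag : String) (stop_tag : String), Dom_find lines start start_tag end_tag stop_tag → Pre_find lines start start_tag end_tag stop_tag → Spec_find lines start start_tag end_tag stop_tag (find lines start start_tag end_tag stop_tag)

-- ===== LEMMAS AND PROOFS =====

-- A's loop, abstracted to the list of (index, cleaned line) pairs it visits
def gA (start_tag end_tag stop_tag : String) : List (Int × String) → Int → Int → Int × Int
  | [], s, e => (s, e)
  | (i, c) :: rest, s, e =>
    if c = "" then gA start_tag end_tag stop_tag rest s e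
    else if c = stop_tag then (s, e)
    else gA start_tag end_tag stop_tag rest
      (if c = start_tag ∧ e = -1 then i else s)
      (if c = end_tag then i else e)

-- B's computation, generalized to arbitrary accumulators s, e
def Bcore (start_tag end_tag stop_tag : String) (L : List (Int × String)) (s e : Int) : Int × Int :=
  let region := regionOf stop_tag L
  let ends := (region.filter (isTag end_tag)).map Prod.fst
  let starts := if e = -1 then (region.filter (startCond start_tag ends.head?)).map Prod.fst else []
  (starts.getLast?.getD s, ends.getLast?.getD e)

lemma mem_regionOf {sp : String} {L : List (Int × String)} {q : Int × String}
    (h : q ∈ regionOf sp L) : q ∈ L := by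
  induction L with
  | nil => simpa [regionOf] using h
  | cons p rest ih =>
    by_cases hp : (p.2 != "" && p.2 == sp) = true
    · simp [regionOf, hp] at h
    · simp [regionOf, hp] at h
      rcases h with h | h
      · simp [h]
      · exact List.mem_cons_of_mem _ (ih h)

lemma getLast?_cons_getD {α : Type} (l : List α) (a d : α) :
    ((a :: l).getLast?).getD d = (l.getLast?).getD a := by
  induction l with
  | nil => rfl
  | cons b t ih => cases t <;> simp [List.getLast?_cons_cons] at * <;> simp [ih]

lemma filter_startCond_some_nil {st : String} {R : List (Int × String)} {i : Int}
    (h : ∀ q ∈ R, i < q.1) :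
    R.filter (startCond st (some i)) = [] := by
  apply List.filter_eq_nil_iff.mpr
  intro q hq
  have hlt := h q hq
  simp [startCond, isTag]
  intro _ _
  omega

lemma head_lt_of_ends {en : String} {R : List (Int × String)} {i f : Int}
    (hgt : ∀ q ∈ R, i < q.1)
    (hf : ((R.filter (isTag en)).map Prod.fst).head? = some f) : i < f := by
  have hmem : f ∈ (R.filter (isTag en)).map Prod.fst := by
    rcases hl : (R.filter (isTag en)).map Prod.fst with _ | ⟨a, t⟩
    · rw [hl] at hf; simp at hf
    · rw [hl] at hf; simp at hf; simp [hf]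
  rcases List.mem_map.mp hmem with ⟨q, hq, rfl⟩
  exact hgt q (List.mem_of_mem_filter hq)

lemma Bcore_cons_other (st en sp c : String) (i s e : Int) (rest : List (Int × String))
    (hc0 : c ≠ "") (hcsp : c ≠ sp) (hce : c ≠ en)
    (hgt : ∀ q ∈ regionOf sp rest, i < q.1) :
    Bcore st en sp ((i, c) :: rest) s e =
      Bcore st en sp rest (if c = st ∧ e = -1 then i else s) e := by
  have hreg : regionOf sp ((i, c) :: rest) = (i, c) :: regionOf sp rest := by
    simp [regionOf, hc0, hcsp]
  have htag : isTag en (i, c) = false := by simp [isTag, hce]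
  unfold Bcore
  dsimp only
  rw [hreg]
  have hhead : startCond st (((regionOf sp rest).filter (isTag en)).map Prod.fst).head? (i, c)
      = decide (c = st) := by
    cases hh : (((regionOf sp rest).filter (isTag en)).map Prod.fst).head? with
    | none =>
      by_cases hcst : c = st
      · subst hcst; simp [startCond, isTag, hc0]
      · simp [startCond, isTag, hcst, hc0]
    | some f =>
      have hle := Int.le_of_lt (head_lt_of_ends hgt hh)
      by_cases hcst : c = st
      · subst hcst; simp [startCond, isTag, hc0, hle]
      · simp [startCond, isTag, hcst, hc0]
  simp only [List.filter_cons, htag, Bool.false_eq_true, if_false]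
  rw [hhead]
  by_cases he : e = -1
  · by_cases hcst : c = st <;> simp [hcst, he, getLast?_cons_getD]
  · simp [he]

lemma gA_eq_Bcore (st en sp : String) (L : List (Int × String))
    (hinc : L.Pairwise (fun p q => p.1 < q.1)) (hnn : ∀ p ∈ L, 0 ≤ p.1) :
    ∀ s e, gA st en sp L s e = Bcore st en sp L s e := by
  induction L with
  | nil => intro s e; simp [gA, Bcore, regionOf]
  | cons p rest ih =>
    obtain ⟨i, c⟩ := p
    intro s e
    have hgt : ∀ q ∈ regionOf sp rest, i < q.1 := fun q hq =>
      (List.pairwise_cons.mp hinc).1 q (mem_regionOf hq)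
    have hi0 : (0:Int) ≤ i := hnn (i, c) (by simp)
    have ih' := ih (List.pairwise_cons.mp hinc).2
      (fun q hq => hnn q (List.mem_cons_of_mem _ hq))
    by_cases hc0 : c = ""
    · subst hc0
      simp only [gA, if_true]
      rw [ih']
      simp [Bcore, regionOf, isTag, startCond]
    · by_cases hcsp : c = sp
      · subst hcsp
        simp only [gA, if_neg hc0, if_true]
        simp [Bcore, regionOf, hc0]
      · simp only [gA, if_neg hc0, if_neg hcsp]
        rw [ih']
        by_cases hce : c = en
        · subst hce
          have hnil := filter_startCond_some_nil (st := st) hgt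
          simp [Bcore, regionOf, hc0, hcsp, isTag, startCond, hnil,
            getLast?_cons_getD]
          rw [if_neg (show ¬ i = -1 by omega)]
          simp [List.filter_cons, startCond, isTag, hc0, hnil]
          by_cases hcst : c = st <;> by_cases he : e = -1 <;> simp [hcst, he]
        · rw [if_neg hce, Bcore_cons_other st en sp c i s e rest hc0 hcsp hce hgt]

theorem find_eq_gA (lines : List String) (st en sp : String) (i s e : Int) :
    findLoop lines st en sp i s e =
      gA st en sp ((PySem.List.pyRange i (lines.length : Int) 1).map
        (fun j => (j, cleanLine ((PySem.List.pyGet? lines j).getD "")))) s e := by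
  rw [findLoop]
  by_cases h : i < (lines.length : Int)
  · rw [PySem.List.pyRange_one_cons h, List.map_cons, dif_pos h]
    simp only [gA]
    split_ifs <;> first | rfl | rw [find_eq_gA]
  · rw [PySem.List.pyRange_one_eq_nil (by omega), List.map_nil, dif_neg h]
    rfl
termination_by ((lines.length : Int) - i).toNat
decreasing_by all_goals omega

-- ===== VERDICT (by name: the statement is the Claim_ definition above) =====
theorem find_spec : Claim_equal_find := by
  intro lines start st en sp _ hpre
  unfold Spec_find
  have hpw : ((PySem.List.pyRange start (lines.length : Int) 1).map
      (fun j => (j, cleanLine ((PySem.List.pyGet? lines j).getD "")))).Pairwise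
      (fun p q => p.1 < q.1) := by
    rw [List.pairwise_map]
    simpa using PySem.List.pairwise_lt_pyRange_one start (lines.length : Int)
  have hnn : ∀ p ∈ (PySem.List.pyRange start (lines.length : Int) 1).map
      (fun j => (j, cleanLine ((PySem.List.pyGet? lines j).getD ""))), 0 ≤ p.1 := by
    intro p hp
    rcases List.mem_map.mp hp with ⟨j, hj, rfl⟩
    have := (PySem.List.mem_pyRange_one.mp hj).1
    have h0 : (0:Int) ≤ start := hpre
    simp
    omega
  rw [find, find_eq_gA, gA_eq_Bcore st en sp _ hpw hnn]
  simp [Bcore, find_alt]
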